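-- pv_equiv track=rewrite | github.com/karinaaa-ed/Short-URL-FastAPI | src/utils/short_code.py | validate_short_code
-- ===== SOURCE A (Python) =====
-- from typing import Optional
-- import string
-- from typing import Optional
--
-- def validate_short_code(code: str, expected_length: Optional[int] = None) -> bool:
--     """Проверяет валидность короткого кода"""
--     DEFAULT_LENGTH = 6
--
--     if not isinstance(code, str):
--         return False
--
--     if expected_length is None:
--         expected_length = DEFAULT_LENGTH
--
--     # Проверка длины
--     if len(code) != expected_length:
--         return False
--
--     # Проверка допустимых символов
--     allowed_chars = string.ascii_letters + string.digits
--     for char in code: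
--         if char not in allowed_chars:
--             return False
--
--     return True
-- ===== SOURCE B (Python) =====
-- import re
--
-- _CODE_RE = re.compile(r'[A-Za-z0-9]*')
--
-- def validate_short_code(code, expected_length=None):
--     """Проверяет валидность короткого кода"""
--     if not isinstance(code, str):
--         return False
--     if expected_length is None:
--         expected_length = 6
--     return len(code) == expected_length and _CODE_RE.fullmatch(code) is not None
-- ===== Notes on version B (the rewrite author's own statement) =====
-- stated objective: idiomatic
-- what changed: The explicit per-character loop with membership in a concatenated allowed-characters string is replaced by a single precompiled regex fullmatch ([A-Za-z0-9]*) combined with the length test in one boolean expression.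
import Mathlib
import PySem

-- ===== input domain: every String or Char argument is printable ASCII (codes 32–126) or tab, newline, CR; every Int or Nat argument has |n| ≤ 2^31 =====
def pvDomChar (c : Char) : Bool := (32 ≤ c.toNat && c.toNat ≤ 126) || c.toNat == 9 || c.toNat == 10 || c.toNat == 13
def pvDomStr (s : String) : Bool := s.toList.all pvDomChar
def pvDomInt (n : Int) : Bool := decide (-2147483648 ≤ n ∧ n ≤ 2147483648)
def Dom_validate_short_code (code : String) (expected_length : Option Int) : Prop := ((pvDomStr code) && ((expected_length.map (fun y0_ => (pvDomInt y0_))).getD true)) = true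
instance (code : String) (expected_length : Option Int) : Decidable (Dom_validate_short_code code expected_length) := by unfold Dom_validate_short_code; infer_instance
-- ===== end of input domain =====

-- B replaces A's per-character loop over the 62-character allowed string with a
-- single regex-style fullmatch of [A-Za-z0-9]* combined with the length test (idiomatic).

-- ===== PORT A =====
-- allowed_chars = string.ascii_letters + string.digits (as the list of its characters)
def pvAllowedChars : List Char := ['a', 'b', 'c', 'd', 'e', 'f', 'g', 'h', 'i', 'j', 'k', 'l', 'm', 'n', 'o', 'p', 'q', 'r', 's', 't', 'u', 'v', 'w', 'x', 'y', 'z', 'A', 'B', 'C', 'D', 'E', 'F', 'G', 'H', 'I', 'J', 'K', 'L', 'M', 'N', 'O', 'P', 'Q', 'R', 'S', 'T', 'U', 'V', 'W', 'X', 'Y', 'Z', '0', '1', '2', '3', '4', '5', '6', '7', '8', '9']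

-- the for-loop of A: return False at the first char not in allowed_chars
def pvLoopA : List Char → Bool
  | [] => true
  | c :: rest => if c ∈ pvAllowedChars then pvLoopA rest else false

def validate_short_code (code : String) (expected_length : Option Int) : Bool :=
  let el : Int := expected_length.getD 6
  if (code.toList.length : Int) ≠ el then false
  else pvLoopA code.toList

-- ===== PORT B =====
-- the regex character class [A-Za-z0-9] as a single-character test
def pvClassAlnum (c : Char) : Bool :=
  ('A' ≤ c && c ≤ 'Z') || ('a' ≤ c && c ≤ 'z') || ('0' ≤ c && c ≤ '9')

def validate_short_code_alt (code : String) (expected_length : Option Int) : Bool :=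
  let el : Int := expected_length.getD 6
  -- re.fullmatch(r'[A-Za-z0-9]*', code) is not None: every character matches the class
  ((code.toList.length : Int) == el) && code.toList.all pvClassAlnum

-- ===== PRECONDITION & SPEC =====
def Spec_validate_short_code (code : String) (expected_length : Option Int) (out : Bool) : Prop := out = validate_short_code_alt code expected_length
instance (code : String) (expected_length : Option Int) (out : Bool) : Decidable (Spec_validate_short_code code expected_length out) := by unfold Spec_validate_short_code; infer_instance

-- ===== CLAIM (what is proved, stated in full; the proofs are below) =====
def Claim_equal_validate_short_code : Prop := ∀ (code : String) (expected_length : Option Int), Dom_validate_short_code code expected_length → Spec_validate_short_code code expected_length (validate_short_code code expected_length)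

-- ===== LEMMAS AND PROOFS =====
set_option maxHeartbeats 1000000 in
theorem mem_allowed_eq (c : Char) (h : c.toNat ≤ 126) :
    decide (c ∈ pvAllowedChars) = pvClassAlnum c := by
  obtain ⟨n, hn, rfl⟩ : ∃ n, n ≤ 126 ∧ Char.ofNat n = c := ⟨c.toNat, h, Char.ofNat_toNat c⟩
  interval_cases n <;> decide

theorem loopA_eq_all (l : List Char) (h : l.all pvDomChar = true) :
    pvLoopA l = l.all pvClassAlnum := by
  induction l with
  | nil => rfl
  | cons c rest ih =>
    simp only [List.all_cons, Bool.and_eq_true] at h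
    have hc : c.toNat ≤ 126 := by
      have := h.1
      simp only [pvDomChar, Bool.or_eq_true, Bool.and_eq_true, decide_eq_true_eq,
        beq_iff_eq] at this
      omega
    have hm := mem_allowed_eq c hc
    simp only [pvLoopA, List.all_cons, ← ih h.2]
    by_cases hcm : c ∈ pvAllowedChars
    · have : pvClassAlnum c = true := by rw [← hm]; simp [hcm]
      simp [hcm, this]
    · have : pvClassAlnum c = false := by rw [← hm]; simp [hcm]
      simp [hcm, this]

-- ===== VERDICT (by name: the statement is the Claim_ definition above) =====
theorem validate_short_code_spec : Claim_equal_validate_short_code := by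
  intro code el hdom
  unfold Spec_validate_short_code validate_short_code validate_short_code_alt
  have hstr : code.toList.all pvDomChar = true := by
    have hd := hdom
    simp only [Dom_validate_short_code, pvDomStr, Bool.and_eq_true] at hd
    exact hd.1
  rw [loopA_eq_all _ hstr]
  show _ = (((code.toList.length : Int) == el.getD 6) && code.toList.all pvClassAlnum)
  by_cases h : (code.toList.length : Int) = el.getD 6
  · rw [if_neg (not_not_intro h), beq_iff_eq.mpr h, Bool.true_and]
  · rw [if_pos h, beq_eq_false_iff_ne.mpr h, Bool.false_and]
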